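-- pv_equiv track=rewrite | github.com/aglabx/varprofiler | visualize_motifs_in_satellites.py | mark_motifs_in_sequence
-- ===== SOURCE A (Python) =====
-- def reverse_complement(seq):
--     """Get reverse complement of DNA sequence."""
--     complement = {'A': 'T', 'T': 'A', 'G': 'C', 'C': 'G',
--                   'N': 'N', 'R': 'Y', 'Y': 'R', 'S': 'S',
--                   'W': 'W', 'K': 'M', 'M': 'K', 'B': 'V',
--                   'V': 'B', 'D': 'H', 'H': 'D'}
--     return ''.join(complement.get(c.upper(), c) for c in seq[::-1])
--
-- def find_motif_positions(sequence, motif, both_strands=True):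
--     """
--     Find all positions of a motif in a sequence.
--     Returns list of (start, end) positions.
--     """
--     positions = []
--     seq_upper = sequence.upper()
--     motif_upper = motif.upper()
--     motif_len = len(motif_upper)
--
--     # Find forward strand matches
--     start = 0
--     while True:
--         pos = seq_upper.find(motif_upper, start)
--         if pos == -1:
--             break
--         positions.append((pos, pos + motif_len))
--         start = pos + 1
--
--     # Find reverse strand matches if requested
--     if both_strands:
--         rc_motif = reverse_complement(motif_upper)
--         if rc_motif != motif_upper:  # Avoid double marking palindromes
--             start = 0
--             while True:
--                 pos = seq_upper.find(rc_motif, start)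
--                 if pos == -1:
--                     break
--                 positions.append((pos, pos + motif_len))
--                 start = pos + 1
--
--     return positions
--
-- def mark_motifs_in_sequence(sequence, motifs, max_motifs=None):
--     """
--     Mark motif occurrences in sequence by converting to lowercase.
--
--     Args:
--         sequence: DNA sequence
--         motifs: List of motif sequences or single motif
--         max_motifs: If specified, only process top N motifs
--
--     Returns:
--         Modified sequence with motifs in lowercase
--     """
--     if isinstance(motifs, str):
--         motifs = [motifs]
--
--     # Limit number of motifs if specified
--     if max_motifs:
--         motifs = motifs[:max_motifs]
--
--     # Create a position mask for lowercase conversion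
--     seq_len = len(sequence)
--     lowercase_mask = [False] * seq_len
--
--     # Find all motif positions
--     for motif in motifs:
--         positions = find_motif_positions(sequence, motif, both_strands=True)
--         for start, end in positions:
--             for i in range(start, min(end, seq_len)):
--                 lowercase_mask[i] = True
--
--     # Apply the mask to create the output sequence
--     result = []
--     for i, char in enumerate(sequence):
--         if lowercase_mask[i]:
--             result.append(char.lower())
--         else:
--             result.append(char.upper())
--
--     return ''.join(result)
-- ===== SOURCE B (Python) =====
-- _RC = str.maketrans('ATGCNRYSWKMBVDH', 'TACGNYRSWMKVBHD')
--
-- def reverse_complement(seq):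
--     """Get reverse complement of DNA sequence (input assumed uppercase)."""
--     return seq.upper().translate(_RC)[::-1]
--
-- def mark_motifs_in_sequence(sequence, motifs, max_motifs=None):
--     """Mark motif occurrences (both strands) in sequence by lowercasing them.
--
--     Position-major single scan: collect the patterns once, then decide for
--     each index whether some pattern occurrence covers it -- no boolean mask
--     array and no repeated str.find passes.
--     """
--     if isinstance(motifs, str):
--         motifs = [motifs]
--     if max_motifs:
--         motifs = motifs[:max_motifs]
--     su = sequence.upper()
--     pats = []
--     for m in motifs:
--         mu = m.upper()
--         pats.append(mu)
--         rc = reverse_complement(mu)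
--         if rc != mu:
--             pats.append(rc)
--     out = []
--     for i, ch in enumerate(sequence):
--         covered = any(su[j:j + len(p)] == p
--                       for p in pats
--                       for j in range(max(0, i - len(p) + 1), i + 1))
--         out.append(ch.lower() if covered else ch.upper())
--     return ''.join(out)
-- ===== Notes on version B (the rewrite author's own statement) =====
-- stated objective: alternative
-- what changed: A runs repeated str.find scans per motif and per strand, records (start,end) intervals and paints each interval into a boolean mask array; B collects the pattern list (motif + reverse complement) once and makes a single position-major scan over the sequence, deciding coverage of each index directly by local pattern comparison, with no mask array and no find loops.
import Mathlib
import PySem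

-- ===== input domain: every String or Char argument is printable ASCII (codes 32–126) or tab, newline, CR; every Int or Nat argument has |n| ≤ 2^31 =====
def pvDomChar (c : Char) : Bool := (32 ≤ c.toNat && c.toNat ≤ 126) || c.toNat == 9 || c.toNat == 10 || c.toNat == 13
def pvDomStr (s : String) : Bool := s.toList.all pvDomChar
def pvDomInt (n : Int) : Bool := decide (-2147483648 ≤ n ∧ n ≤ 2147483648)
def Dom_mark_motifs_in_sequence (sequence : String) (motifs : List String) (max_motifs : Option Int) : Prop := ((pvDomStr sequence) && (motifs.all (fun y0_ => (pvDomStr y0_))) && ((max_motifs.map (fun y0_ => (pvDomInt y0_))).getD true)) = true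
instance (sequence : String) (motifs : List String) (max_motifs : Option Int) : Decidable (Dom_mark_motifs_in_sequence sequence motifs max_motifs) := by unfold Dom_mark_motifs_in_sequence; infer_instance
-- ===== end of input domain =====

-- B replaces A's per-motif str.find loops + boolean mask array by one position-major
-- scan that decides coverage of each index directly (objective: alternative algorithm).

-- ===== PORT A =====
-- A's complement dict, in A's insertion order
def pvComplementA : PySem.Dict Char Char :=
  PySem.Dict.ofList [('A','T'),('T','A'),('G','C'),('C','G'),('N','N'),('R','Y'),('Y','R'),
                     ('S','S'),('W','W'),('K','M'),('M','K'),('B','V'),('V','B'),('D','H'),('H','D')]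

-- ''.join(complement.get(c.upper(), c) for c in seq[::-1]); seq[::-1] is List.reverse
def reverse_complement (seq : List Char) : List Char :=
  seq.reverse.map (fun c => pvComplementA.getD (PySem.Chars.upperChar c) c)

-- the 'while True: pos = seq_upper.find(motif, start) …' loop; fuel only makes it total
-- (start strictly increases and find returns -1 once start exceeds the length, so
-- su.length + 2 fuel always suffices)
def pvFindLoop (su pat : List Char) (L : Nat) (start : Nat) (fuel : Nat)
    (acc : List (Int × Int)) : List (Int × Int) :=
  match fuel with
  | 0 => acc
  | fuel + 1 =>
    let pos := PySem.Chars.findFrom su pat (start : Int) none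
    if pos = -1 then acc
    else pvFindLoop su pat L (pos.toNat + 1) fuel (acc ++ [(pos, pos + (L : Int))])

def find_motif_positions (sequence motif : List Char) (both_strands : Bool) : List (Int × Int) :=
  let seq_upper := PySem.Chars.upper sequence
  let motif_upper := PySem.Chars.upper motif
  let motif_len := motif_upper.length
  let positions := pvFindLoop seq_upper motif_upper motif_len 0 (seq_upper.length + 2) []
  if both_strands then
    let rc_motif := reverse_complement motif_upper
    if rc_motif ≠ motif_upper then
      pvFindLoop seq_upper rc_motif motif_len 0 (seq_upper.length + 2) positions
    else positions
  else positions

def mark_motifs_in_sequence (sequence : String) (motifs : List String) (max_motifs : Option Int) : String :=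
  -- isinstance(motifs, str) branch is dead under the type convention (motifs is a list)
  let motifs := match max_motifs with        -- 'if max_motifs: motifs = motifs[:max_motifs]'
    | some n => if n = 0 then motifs else PySem.List.slice motifs none (some n)
    | none => motifs
  let seqL := sequence.toList
  let seq_len := seqL.length
  let mask0 : List Bool := List.replicate seq_len false
  let mask := motifs.foldl (fun mask motif =>
    (find_motif_positions seqL motif.toList true).foldl (fun mask se =>
      -- for i in range(start, min(end, seq_len)): mask[i] = True  (these indices are ≥ 0)
      (PySem.List.pyRange se.1 (min se.2 (seq_len : Int)) 1).foldl
        (fun mask i => mask.set i.toNat true) mask) mask) mask0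
  let result := (PySem.List.enumerate seqL).foldl
    (fun acc ic => acc ++ [if PySem.List.pyGetD mask ic.1 false
                           then PySem.Chars.lowerChar ic.2 else PySem.Chars.upperChar ic.2]) []
  String.ofList result

-- ===== PORT B =====
-- str.maketrans('ATGCNRYSWKMBVDH', 'TACGNYRSWMKVBHD')
def pvRCTable : PySem.Dict Char Char :=
  PySem.Dict.ofList [('A','T'),('T','A'),('G','C'),('C','G'),('N','N'),('R','Y'),('Y','R'),
                     ('S','S'),('W','W'),('K','M'),('M','K'),('B','V'),('V','B'),('D','H'),('H','D')]

-- seq.upper().translate(_RC)[::-1]; translate maps each char through the table (identity default)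
def reverse_complement_alt (seq : List Char) : List Char :=
  ((PySem.Chars.upper seq).map (fun c => pvRCTable.getD c c)).reverse

def mark_motifs_in_sequence_alt (sequence : String) (motifs : List String) (max_motifs : Option Int) : String :=
  let motifs := match max_motifs with
    | some n => if n = 0 then motifs else PySem.List.slice motifs none (some n)
    | none => motifs
  let seqL := sequence.toList
  let su := PySem.Chars.upper seqL
  let pats := motifs.foldl (fun pats m =>
    let mu := PySem.Chars.upper m.toList
    let pats := pats ++ [mu]
    let rc := reverse_complement_alt mu
    if rc ≠ mu then pats ++ [rc] else pats) []
  let out := (PySem.List.enumerate seqL).foldl (fun acc ic =>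
    let covered := pats.any (fun p =>
      (PySem.List.pyRange (max 0 (ic.1 - (p.length : Int) + 1)) (ic.1 + 1) 1).any
        (fun j => PySem.List.slice su (some j) (some (j + (p.length : Int))) == p))
    acc ++ [if covered then PySem.Chars.lowerChar ic.2 else PySem.Chars.upperChar ic.2]) []
  String.ofList out

-- ===== PRECONDITION & SPEC =====
def Spec_mark_motifs_in_sequence (sequence : String) (motifs : List String) (max_motifs : Option Int) (out : String) : Prop := out = mark_motifs_in_sequence_alt sequence motifs max_motifs
instance (sequence : String) (motifs : List String) (max_motifs : Option Int) (out : String) : Decidable (Spec_mark_motifs_in_sequence sequence motifs max_motifs out) := by unfold Spec_mark_motifs_in_sequence; infer_instance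

-- ===== CLAIM (what is proved, stated in full; the proofs are below) =====
def Claim_equal_mark_motifs_in_sequence : Prop := ∀ (sequence : String) (motifs : List String) (max_motifs : Option Int), Dom_mark_motifs_in_sequence sequence motifs max_motifs → Spec_mark_motifs_in_sequence sequence motifs max_motifs (mark_motifs_in_sequence sequence motifs max_motifs)

-- ===== LEMMAS AND PROOFS =====

-- "pattern p covers index i of su": some occurrence of p starting at j reaches i
def pvCov (su p : List Char) (i : Nat) : Prop :=
  ∃ j : Nat, j ≤ i ∧ i < j + p.length ∧ p <+: su.drop j

-- the pattern list contributed by one motif: upper-cased motif, and its reverse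
-- complement when that differs
def pvPats (m : List Char) : List (List Char) :=
  let mu := PySem.Chars.upper m
  mu :: (if reverse_complement_alt mu ≠ mu then [reverse_complement_alt mu] else [])

theorem pv_upperChar_idem (c : Char) :
    PySem.Chars.upperChar (PySem.Chars.upperChar c) = PySem.Chars.upperChar c := by
  simp only [PySem.Chars.upperChar, PySem.Chars.islower]
  split_ifs with h1 h2
  · exfalso
    simp only [decide_eq_true_eq, Bool.and_eq_true] at h1 h2
    rw [Char.le_def, Char.le_def] at h1
    have hn1 : 97 ≤ c.toNat ∧ c.toNat ≤ 122 := ⟨h1.1, h1.2⟩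
    have hval : (c.toNat - 32).isValidChar := by left; omega
    have hv : (Char.ofNat (c.toNat - 32)).toNat = c.toNat - 32 := by
      rw [Char.toNat_ofNat, if_pos hval]
    rw [Char.le_def] at h2
    have hx : (Char.ofNat (c.toNat - 32)).toNat ≥ 97 := h2.1
    omega
  · rfl
  · rfl

-- the two reverse_complement implementations agree on upper-cased input
theorem pv_rc_agree (m : List Char) :
    reverse_complement (PySem.Chars.upper m) = reverse_complement_alt (PySem.Chars.upper m) := by
  simp only [reverse_complement, reverse_complement_alt, PySem.Chars.upper, pvRCTable, pvComplementA,
    List.map_reverse, List.map_map]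
  congr 1
  apply List.map_congr_left
  intro c _
  simp [Function.comp, pv_upperChar_idem]

theorem pv_rc_length (m : List Char) : (reverse_complement m).length = m.length := by
  simp [reverse_complement]

theorem pv_infix_iff_exists_drop (sub t : List Char) :
    sub <:+: t ↔ ∃ m : Nat, m ≤ t.length ∧ sub <+: t.drop m := by
  constructor
  · rintro ⟨s, r, rfl⟩
    exact ⟨s.length, by simp,
      by rw [List.append_assoc, List.drop_left' rfl]; exact List.prefix_append _ _⟩
  · rintro ⟨m, hm, hpre⟩
    exact hpre.isInfix.trans (List.drop_suffix m t).isInfix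

theorem pv_findFrom_gt (su pat : List Char) (start : Nat) (h : su.length < start) :
    PySem.Chars.findFrom su pat (start : Int) none = -1 := by
  simp only [PySem.Chars.findFrom]
  split_ifs <;> first | rfl | (exfalso; omega)

theorem pv_findFrom_le (su pat : List Char) (start : Nat) (h : start ≤ su.length) :
    PySem.Chars.findFrom su pat (start : Int) none ≤ (su.length : Int) := by
  rw [PySem.Chars.findFrom_natCast su pat start h]
  split_ifs with hf
  · omega
  · have := PySem.Chars.find_le_length (su.drop start) pat
    simp only [List.length_drop] at this
    omega

theorem pv_mem_findLoop (su pat : List Char) (L : Nat) :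
    ∀ (fuel start : Nat) (acc : List (Int × Int)) (a b : Int),
      su.length + 2 ≤ fuel + start →
      ((a, b) ∈ pvFindLoop su pat L start fuel acc ↔
        (a, b) ∈ acc ∨ ∃ j : Nat, start ≤ j ∧ j ≤ su.length ∧ pat <+: su.drop j ∧
          a = (j : Int) ∧ b = (j : Int) + (L : Int)) := by
  intro fuel
  induction fuel with
  | zero =>
    intro start acc a b hfuel
    simp only [pvFindLoop]
    constructor
    · intro h; exact Or.inl h
    · rintro (h | ⟨j, hj1, hj2, _⟩)
      · exact h
      · omega
  | succ fuel ih =>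
    intro start acc a b hfuel
    by_cases hs : start ≤ su.length
    · by_cases hneg : PySem.Chars.findFrom su pat (start : Int) none = -1
      · simp only [pvFindLoop, hneg]
        have hno : ¬ pat <:+: su.drop start :=
          (PySem.Chars.findFrom_natCast_eq_neg_one_iff su pat start hs).mp hneg
        constructor
        · intro h; exact Or.inl h
        · rintro (h | ⟨j, hj1, hj2, hj3, _⟩)
          · exact h
          · exfalso
            apply hno
            rw [pv_infix_iff_exists_drop]
            refine ⟨j - start, by simp [List.length_drop]; omega, ?_⟩
            rw [List.drop_drop]
            have hj' : start + (j - start) = j := by omega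
            rwa [hj']
      · obtain ⟨hge, hpre, hmin⟩ := PySem.Chars.findFrom_natCast_spec su pat start hs hneg
        simp only [pvFindLoop]
        rw [if_neg hneg]
        set p := PySem.Chars.findFrom su pat (start : Int) none with hp
        have hple : p ≤ (su.length : Int) := pv_findFrom_le su pat start hs
        have hp0 : 0 ≤ p := le_trans (by omega) hge
        have hcast : p = ((p.toNat : Nat) : Int) := by omega
        rw [ih (p.toNat + 1) (acc ++ [(p, p + (L : Int))]) a b (by omega)]
        simp only [List.mem_append, List.mem_singleton, Prod.mk.injEq]
        constructor
        · rintro ((h | ⟨ha, hb⟩) | ⟨j, hj1, hj2, hj3, hj4, hj5⟩)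
          · exact Or.inl h
          · exact Or.inr ⟨p.toNat, by omega, by omega, hpre, by omega, by omega⟩
          · exact Or.inr ⟨j, by omega, hj2, hj3, hj4, hj5⟩
        · rintro (h | ⟨j, hj1, hj2, hj3, hj4, hj5⟩)
          · exact Or.inl (Or.inl h)
          · rcases Nat.lt_or_ge j (p.toNat + 1) with hlt | hge2
            · have hjp : j = p.toNat := by
                rcases Nat.lt_or_ge j p.toNat with hlt2 | _
                · exact absurd hj3 (hmin j hj1 hlt2)
                · omega
              exact Or.inl (Or.inr ⟨by omega, by omega⟩)
            · exact Or.inr ⟨j, hge2, hj2, hj3, hj4, hj5⟩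
    · have hneg := pv_findFrom_gt su pat start (by omega)
      simp only [pvFindLoop, hneg]
      constructor
      · intro h; exact Or.inl h
      · rintro (h | ⟨j, hj1, hj2, _⟩)
        · exact h
        · omega

theorem pv_mem_positions (sequence motif : List Char) (se : Int × Int) :
    se ∈ find_motif_positions sequence motif true ↔
      ∃ p ∈ pvPats motif, ∃ j : Nat, j ≤ (PySem.Chars.upper sequence).length ∧
        p <+: (PySem.Chars.upper sequence).drop j ∧ se = ((j : Int), (j : Int) + (p.length : Int)) := by
  obtain ⟨a, b⟩ := se
  set su := PySem.Chars.upper sequence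
  set mu := PySem.Chars.upper motif with hmu
  have hrc : reverse_complement mu = reverse_complement_alt mu := pv_rc_agree motif
  have hrcl : (reverse_complement_alt mu).length = mu.length := by
    rw [← hrc]; exact pv_rc_length mu
  simp only [find_motif_positions, if_pos, pvPats, ← hmu, hrc]
  by_cases hne : reverse_complement_alt mu ≠ mu
  · rw [if_pos hne, if_pos hne]
    rw [pv_mem_findLoop su _ mu.length (su.length + 2) 0 _ a b (by omega)]
    rw [pv_mem_findLoop su mu mu.length (su.length + 2) 0 [] a b (by omega)]
    simp only [List.mem_cons, List.not_mem_nil, false_or, or_false, Prod.mk.injEq]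
    constructor
    · rintro (⟨j, _, hj2, hj3, hj4, hj5⟩ | ⟨j, _, hj2, hj3, hj4, hj5⟩)
      · exact ⟨mu, Or.inl rfl, j, hj2, hj3, by simp [hj4, hj5]⟩
      · exact ⟨reverse_complement_alt mu, Or.inr rfl, j, hj2, hj3, by simp [hj4, hj5, hrcl]⟩
    · rintro ⟨p, (rfl | rfl), j, hj1, hj2, hj3, hj4⟩
      · exact Or.inl ⟨j, by omega, hj1, hj2, hj3, hj4⟩
      · exact Or.inr ⟨j, by omega, hj1, hj2, by simpa [hrcl] using hj3, by simpa [hrcl] using hj4⟩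
  · rw [if_neg hne, if_neg hne]
    rw [pv_mem_findLoop su mu mu.length (su.length + 2) 0 [] a b (by omega)]
    simp only [List.mem_cons, List.not_mem_nil, false_or, or_false, Prod.mk.injEq]
    constructor
    · rintro ⟨j, _, hj2, hj3, hj4, hj5⟩
      exact ⟨mu, rfl, j, hj2, hj3, by simp [hj4, hj5]⟩
    · rintro ⟨p, rfl, j, hj1, hj2, hj3, hj4⟩
      exact ⟨j, by omega, hj1, hj2, hj3, hj4⟩

theorem pv_len_setFold (js : List Int) (mask : List Bool) :
    (js.foldl (fun m j => m.set j.toNat true) mask).length = mask.length := by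
  induction js generalizing mask with
  | nil => rfl
  | cons j js ih => simp [List.foldl_cons, ih, List.length_set]

theorem pv_getD_setFold (js : List Int) (mask : List Bool) (i : Nat) (hi : i < mask.length)
    (hnn : ∀ j ∈ js, 0 ≤ j) :
    (js.foldl (fun m j => m.set j.toNat true) mask).getD i false
      = (mask.getD i false || js.any (fun j => j == (i : Int))) := by
  induction js generalizing mask with
  | nil => simp
  | cons j js ih =>
    simp only [List.foldl_cons, List.any_cons]
    rw [ih (mask.set j.toNat true) (by simp [List.length_set]; omega)
        (fun x hx => hnn x (by simp [hx]))]
    have hj0 : 0 ≤ j := hnn j (by simp)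
    by_cases hji : j = (i : Int)
    · have hti : j.toNat = i := by omega
      have h1 : (mask.set j.toNat true).getD i false = true := by
        rw [hti]
        simp [List.getD_eq_getElem?_getD, List.getElem?_set_self hi]
      rw [h1]
      simp [hji]
    · have hne : j.toNat ≠ i := by omega
      have h1 : (mask.set j.toNat true).getD i false = mask.getD i false := by
        simp [List.getD_eq_getElem?_getD, List.getElem?_set_ne hne]
      rw [h1]
      have h2 : (j == (i:Int)) = false := by simp [hji]
      simp [h2]

theorem pv_any_pyRange (a b : Int) (i : Nat) :
    (PySem.List.pyRange a b 1).any (fun j => j == (i : Int)) = decide (a ≤ (i:Int) ∧ (i:Int) < b) := by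
  rcases Bool.eq_false_or_eq_true
    ((PySem.List.pyRange a b 1).any (fun j => j == (i : Int))) with h | h <;> rw [h]
  · symm
    rw [decide_eq_true_eq]
    rw [List.any_eq_true] at h
    obtain ⟨j, hj, he⟩ := h
    have : j = (i:Int) := by simpa using he
    subst this
    exact PySem.List.mem_pyRange_one.mp hj
  · symm
    rw [decide_eq_false_iff_not]
    intro ⟨h1, h2⟩
    rw [List.any_eq_false] at h
    exact h _ (PySem.List.mem_pyRange_one.mpr ⟨h1, h2⟩) (by simp)

theorem pv_getD_markPos (c : Int) (se : Int × Int) (mask : List Bool) (i : Nat) (hi : i < mask.length)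
    (h0 : 0 ≤ se.1) :
    ((PySem.List.pyRange se.1 (min se.2 c) 1).foldl (fun m j => m.set j.toNat true) mask).getD i false
      = (mask.getD i false || decide (se.1 ≤ (i:Int) ∧ (i:Int) < min se.2 c)) := by
  rw [pv_getD_setFold _ _ _ hi (fun j hj => le_trans h0 (PySem.List.mem_pyRange_one.mp hj).1),
      pv_any_pyRange]

theorem pv_len_posFold (c : Int) (P : List (Int × Int)) (mask : List Bool) :
    (P.foldl (fun m se => (PySem.List.pyRange se.1 (min se.2 c) 1).foldl
        (fun m j => m.set j.toNat true) m) mask).length = mask.length := by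
  induction P generalizing mask with
  | nil => rfl
  | cons se P ih => simp only [List.foldl_cons]; rw [ih, pv_len_setFold]

theorem pv_getD_posFold (c : Int) (P : List (Int × Int)) (mask : List Bool) (i : Nat)
    (hi : i < mask.length) (h0 : ∀ se ∈ P, 0 ≤ se.1) :
    (P.foldl (fun m se => (PySem.List.pyRange se.1 (min se.2 c) 1).foldl
        (fun m j => m.set j.toNat true) m) mask).getD i false
      = (mask.getD i false || P.any (fun se => decide (se.1 ≤ (i:Int) ∧ (i:Int) < min se.2 c))) := by
  induction P generalizing mask with
  | nil => simp
  | cons se P ih =>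
    simp only [List.foldl_cons, List.any_cons]
    rw [ih _ (by rw [pv_len_setFold]; omega) (fun x hx => h0 x (by simp [hx])),
        pv_getD_markPos c se mask i hi (h0 se (by simp))]
    simp [Bool.or_assoc]

theorem pv_pos_nonneg (sequence motif : List Char) (se : Int × Int)
    (h : se ∈ find_motif_positions sequence motif true) : 0 ≤ se.1 := by
  obtain ⟨p, _, j, _, _, he⟩ := (pv_mem_positions sequence motif se).mp h
  rw [he]
  exact Int.natCast_nonneg j

theorem pv_getD_motifFold (sequence : List Char) (c : Int) (ms : List String) (mask : List Bool)
    (i : Nat) (hi : i < mask.length) :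
    (ms.foldl (fun mask motif =>
      (find_motif_positions sequence motif.toList true).foldl (fun m se =>
        (PySem.List.pyRange se.1 (min se.2 c) 1).foldl (fun m j => m.set j.toNat true) m) mask)
      mask).getD i false
    = (mask.getD i false || ms.any (fun motif =>
        (find_motif_positions sequence motif.toList true).any
          (fun se => decide (se.1 ≤ (i:Int) ∧ (i:Int) < min se.2 c)))) := by
  induction ms generalizing mask with
  | nil => simp
  | cons m ms ih =>
    simp only [List.foldl_cons, List.any_cons]
    rw [ih _ (by rw [pv_len_posFold]; omega),
        pv_getD_posFold c _ mask i hi (fun se hse => pv_pos_nonneg sequence m.toList se hse)]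
    simp [Bool.or_assoc]

-- cover condition of one motif, A side: some recorded interval covers i
theorem pv_any_positions (sequence motif : List Char) (i : Nat) (hi : i < sequence.length) :
    (((find_motif_positions sequence motif true).any
        (fun se => decide (se.1 ≤ (i:Int) ∧ (i:Int) < min se.2 (sequence.length : Int)))) = true)
    ↔ ∃ p ∈ pvPats motif, pvCov (PySem.Chars.upper sequence) p i := by
  have hlen : (PySem.Chars.upper sequence).length = sequence.length := by
    simp [PySem.Chars.upper]
  rw [List.any_eq_true]
  constructor
  · rintro ⟨se, hse, hcond⟩
    obtain ⟨p, hp, j, hj1, hj2, he⟩ := (pv_mem_positions sequence motif se).mp hse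
    rw [he] at hcond
    simp only [decide_eq_true_eq] at hcond
    refine ⟨p, hp, j, by omega, ?_, hj2⟩
    have := hcond.2
    omega
  · rintro ⟨p, hp, j, hj1, hj2, hpre⟩
    refine ⟨((j:Int), (j:Int) + (p.length : Int)), ?_, ?_⟩
    · exact (pv_mem_positions sequence motif _).mpr ⟨p, hp, j, by omega, hpre, rfl⟩
    · simp only [decide_eq_true_eq]
      constructor
      · omega
      · omega

-- B's pattern-list loop is a flatMap of pvPats
theorem pv_pats_eq (ms : List String) :
    ∀ acc : List (List Char),
      ms.foldl (fun pats m =>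
        let mu := PySem.Chars.upper m.toList
        let pats := pats ++ [mu]
        let rc := reverse_complement_alt mu
        if rc ≠ mu then pats ++ [rc] else pats) acc
      = acc ++ ms.flatMap (fun m => pvPats m.toList) := by
  induction ms with
  | nil => intro acc; simp
  | cons m ms ih =>
    intro acc
    simp only [List.foldl_cons, List.flatMap_cons]
    rw [ih]
    by_cases hne : reverse_complement_alt (PySem.Chars.upper m.toList) ≠ PySem.Chars.upper m.toList
    · simp [pvPats, hne]
    · simp [pvPats, hne]

-- B's inner range test: some occurrence of p covers i
theorem pv_inner_any (su p : List Char) (i : Nat) :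
    (((PySem.List.pyRange (max 0 ((i:Int) - (p.length:Int) + 1)) ((i:Int)+1) 1).any
        (fun j => PySem.List.slice su (some j) (some (j + (p.length:Int))) == p)) = true)
    ↔ pvCov su p i := by
  rw [List.any_eq_true]
  constructor
  · rintro ⟨j, hj, he⟩
    obtain ⟨hj1, hj2⟩ := PySem.List.mem_pyRange_one.mp hj
    have hj0 : 0 ≤ j := le_trans (le_max_left _ _) hj1
    have hc : j = ((j.toNat : Nat) : Int) := by omega
    rw [hc] at he
    have hb : ((j.toNat : Nat) : Int) + (p.length : Int) = ((j.toNat + p.length : Nat) : Int) := by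
      push_cast; ring
    rw [hb, PySem.List.slice_natCast] at he
    have htake : (su.drop j.toNat).take p.length = p := by
      have h' : j.toNat + p.length - j.toNat = p.length := by omega
      rw [h'] at he
      exact beq_iff_eq.mp he
    refine ⟨j.toNat, by omega, by omega, ?_⟩
    rw [List.prefix_iff_eq_take]
    exact htake.symm
  · rintro ⟨j, hj1, hj2, hpre⟩
    refine ⟨(j : Int), PySem.List.mem_pyRange_one.mpr ⟨by simp; omega, by omega⟩, ?_⟩
    have hb : ((j : Nat) : Int) + (p.length : Int) = ((j + p.length : Nat) : Int) := by
      push_cast; ring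
    rw [hb, PySem.List.slice_natCast]
    have h' : j + p.length - j = p.length := by omega
    rw [h']
    exact beq_iff_eq.mpr ((List.prefix_iff_eq_take.mp hpre).symm)

theorem pv_mem_enumerate {α : Type} (xs : List α) :
    ∀ (s : Int) (p : Int × α), p ∈ PySem.List.enumerate xs s → s ≤ p.1 ∧ p.1 < s + xs.length := by
  induction xs with
  | nil => intro s p h; simp [PySem.List.enumerate] at h
  | cons x t ih =>
    intro s p h
    simp only [PySem.List.enumerate, List.mem_cons] at h
    rcases h with rfl | h
    · simp
    · have := ih (s + 1) p h
      simp only [List.length_cons]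
      push_cast
      omega

-- ===== VERDICT (by name: the statement is the Claim_ definition above) =====
theorem mark_motifs_in_sequence_spec : Claim_equal_mark_motifs_in_sequence := by
  intro sequence motifs max_motifs _
  unfold Spec_mark_motifs_in_sequence
  simp only [mark_motifs_in_sequence, mark_motifs_in_sequence_alt]
  rw [PySem.List.foldl_append_singleton_eq_map, PySem.List.foldl_append_singleton_eq_map,
      pv_pats_eq]
  simp only [List.nil_append]
  congr 1
  apply List.map_congr_left
  intro ic hic
  obtain ⟨h1, h2⟩ := pv_mem_enumerate sequence.toList 0 ic hic
  have hk : ic.1 = ((ic.1.toNat : Nat) : Int) := by omega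
  set k := ic.1.toNat with hkdef
  have hklt : k < sequence.toList.length := by omega
  rw [hk, PySem.List.pyGetD_natCast]
  have hcond :
      ((match max_motifs with
        | some n => if n = 0 then motifs else PySem.List.slice motifs none (some n)
        | none => motifs).foldl (fun (mask : List Bool) (motif : String) =>
          (find_motif_positions sequence.toList motif.toList true).foldl (fun (m : List Bool) (se : Int × Int) =>
            (PySem.List.pyRange se.1 (min se.2 (sequence.toList.length : Int)) 1).foldl
              (fun (m : List Bool) (j : Int) => m.set j.toNat true) m) mask)
          (List.replicate sequence.toList.length false)).getD k false
      = ((match max_motifs with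
        | some n => if n = 0 then motifs else PySem.List.slice motifs none (some n)
        | none => motifs).flatMap (fun (m : String) => pvPats m.toList)).any (fun (p : List Char) =>
          (PySem.List.pyRange (max 0 (((k : Nat) : Int) - (p.length : Int) + 1)) (((k : Nat) : Int) + 1) 1).any
            (fun j => PySem.List.slice (PySem.Chars.upper sequence.toList) (some j)
              (some (j + (p.length : Int))) == p)) := by
    rw [pv_getD_motifFold sequence.toList (sequence.toList.length : Int) _ _ k
        (by simpa using hklt)]
    rw [List.any_flatMap]
    have hrep : (List.replicate sequence.toList.length false).getD k false = false := by simp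
    rw [hrep, Bool.false_or]
    apply PySem.List.any_congr_mem
    intro m _
    apply Bool.coe_iff_coe.mp
    rw [pv_any_positions sequence.toList m.toList k hklt]
    constructor
    · rintro ⟨p, hp, hcov⟩
      rw [List.any_eq_true]
      exact ⟨p, hp, (pv_inner_any (PySem.Chars.upper sequence.toList) p k).mpr hcov⟩
    · intro h
      rw [List.any_eq_true] at h
      obtain ⟨p, hp, hinner⟩ := h
      exact ⟨p, hp, (pv_inner_any (PySem.Chars.upper sequence.toList) p k).mp hinner⟩
  rw [hcond]
  simp
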